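-- pv_equiv track=rewrite | github.com/siddharthk004/Python_Programs | program16.py | FactDiff
-- ===== SOURCE A (Python) =====
-- def FactDiff(no1):
--     sum1 = 0
--     sum2 = 0
--
--     for i in range(1,no1):
--         if no1 % i == 0:
--             sum1 = sum1 + i
--         else:
--             sum2 = sum2 + i
--     return sum1-sum2
-- ===== SOURCE B (Python) =====
-- def FactDiff(no1):
--     # closed-form total of the scanned range, divisor sum by square-root pairing
--     if no1 <= 1:
--         return 0
--     sigma = 0
--     i = 1
--     while i * i <= no1:
--         if no1 % i == 0:
--             sigma = sigma + i
--             j = no1 // i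
--             if j != i:
--                 sigma = sigma + j
--         i = i + 1
--     proper = sigma - no1
--     return 2 * proper - no1 * (no1 - 1) // 2
-- ===== Notes on version B (the rewrite author's own statement) =====
-- stated objective: faster
-- what changed: Replaces the linear scan over all numbers below n by a closed form for their total together with a square-root divisor-pairing loop for the divisor sum.
import Mathlib
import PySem

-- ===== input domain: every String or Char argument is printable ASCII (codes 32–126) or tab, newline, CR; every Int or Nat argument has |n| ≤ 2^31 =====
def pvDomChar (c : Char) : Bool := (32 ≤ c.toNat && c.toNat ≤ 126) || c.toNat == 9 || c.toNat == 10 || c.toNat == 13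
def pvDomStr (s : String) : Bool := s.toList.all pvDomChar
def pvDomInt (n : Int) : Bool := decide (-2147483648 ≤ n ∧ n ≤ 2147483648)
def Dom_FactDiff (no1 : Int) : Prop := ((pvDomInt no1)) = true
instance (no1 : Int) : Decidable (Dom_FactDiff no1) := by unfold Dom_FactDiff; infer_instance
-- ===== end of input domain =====

-- B replaces A's O(n) scan by the closed form n(n-1)/2 plus a sqrt-pairing divisor sum (faster, asymptotic).

-- ===== PORT A =====
def FactDiff (no1 : Int) : Int :=
  let s := (PySem.List.pyRange 1 no1 1).foldl
    (fun (s : Int × Int) i =>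
      if PySem.Int.mod no1 i == 0 then (s.1 + i, s.2) else (s.1, s.2 + i))
    (0, 0)
  s.1 - s.2

-- ===== PORT B =====
-- the while loop of Source B: i, sigma are the loop state
def FactDiffSigmaLoop (no1 i sigma : Int) : Int :=
  if _h : i * i ≤ no1 then
    FactDiffSigmaLoop no1 (i + 1)
      (if PySem.Int.mod no1 i == 0 then
        (let s := sigma + i
         let j := PySem.Int.floordiv no1 i
         if j ≠ i then s + j else s)
       else sigma)
  else sigma
termination_by (no1 + 1 - i).toNat
decreasing_by
  have hii : i ≤ i * i := by
    rcases le_total i 0 with h | h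
    · nlinarith
    · nlinarith
  omega

def FactDiff_alt (no1 : Int) : Int :=
  if no1 ≤ 1 then 0
  else
    let sigma := FactDiffSigmaLoop no1 1 0
    let proper := sigma - no1
    2 * proper - PySem.Int.floordiv (no1 * (no1 - 1)) 2

-- ===== PRECONDITION & SPEC =====
def Spec_FactDiff (no1 : Int) (out : Int) : Prop := out = FactDiff_alt no1
instance (no1 : Int) (out : Int) : Decidable (Spec_FactDiff no1 out) := by unfold Spec_FactDiff; infer_instance

-- ===== CLAIM (what is proved, stated in full; the proofs are below) =====
def Claim_equal_FactDiff : Prop := ∀ (no1 : Int), Dom_FactDiff no1 → Spec_FactDiff no1 (FactDiff no1)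

-- ===== LEMMAS AND PROOFS =====

-- A's loop splits the running sums: component-wise description of the fold
theorem factdiff_fold (n : Int) (l : List Int) (s : Int × Int) :
    l.foldl (fun (s : Int × Int) i =>
      if PySem.Int.mod n i == 0 then (s.1 + i, s.2) else (s.1, s.2 + i)) s
    = (s.1 + (l.map (fun i => if PySem.Int.mod n i == 0 then i else 0)).sum,
       s.2 + (l.map (fun i => if PySem.Int.mod n i == 0 then 0 else i)).sum) := by
  induction l generalizing s with
  | nil => simp
  | cons x xs ih =>
    rw [List.foldl_cons, ih]
    by_cases hx : PySem.Int.mod n x = 0 <;> simp [hx, Prod.ext_iff] <;> ring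

-- divisor-sum tail of B's loop: what remains to be added from counter value i on
def sigmaTail (m : ℕ) (i : ℕ) : ℤ :=
  ∑ d ∈ m.divisors.filter (fun d => i ≤ d ∧ i ≤ m / d), (d : ℤ)

theorem sigmaTail_zero (m a : ℕ) (hlt : m < a * a) : sigmaTail m a = 0 := by
  apply Finset.sum_eq_zero
  intro d hd
  simp only [Finset.mem_filter, Nat.mem_divisors] at hd
  obtain ⟨⟨hdvd, hm0⟩, had, hamd⟩ := hd
  have h1 : m / d * d = m := Nat.div_mul_cancel hdvd
  have h2 : a * a ≤ m / d * d := Nat.mul_le_mul hamd had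
  omega

theorem sigmaTail_step (m a : ℕ) (hm : 2 ≤ m) (ha : 1 ≤ a) (haa : a * a ≤ m) :
    sigmaTail m a
      = (if a ∣ m then ((a : ℤ) + if m / a ≠ a then ((m / a : ℕ) : ℤ) else 0) else 0)
        + sigmaTail m (a + 1) := by
  have hm0 : m ≠ 0 := by omega
  by_cases hdvd : a ∣ m
  · rw [if_pos hdvd]
    unfold sigmaTail
    rw [Finset.sum_filter, Finset.sum_filter]
    have hamdiv : a ≤ m / a := (Nat.le_div_iff_mul_le (by omega)).2 haa
    have hma : m / (m / a) = a := Nat.div_div_self hdvd hm0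
    have key : ∀ d ∈ m.divisors,
        (if a ≤ d ∧ a ≤ m / d then (d : ℤ) else 0)
          = ((if d = a then (a : ℤ) else 0)
             + (if m / a ≠ a then (if d = m / a then ((m / a : ℕ) : ℤ) else 0) else 0))
            + (if a + 1 ≤ d ∧ a + 1 ≤ m / d then (d : ℤ) else 0) := by
      intro d hd
      simp only [Nat.mem_divisors] at hd
      obtain ⟨hddvd, _⟩ := hd
      have hmd : m / (m / d) = d := Nat.div_div_self hddvd hm0
      by_cases hda : d = a
      · subst hda
        have t2 : (if m / d ≠ d then (if d = m / d then ((m / d : ℕ) : ℤ) else 0) else 0) = 0 := by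
          by_cases h : m / d = d
          · rw [if_neg (by simp [h])]
          · rw [if_pos h, if_neg (fun hh => h hh.symm)]
        rw [if_pos ⟨le_refl d, hamdiv⟩, if_pos rfl, t2, if_neg (by omega)]
        ring
      · by_cases hdma : d = m / a
        · have hmda : m / d = a := by rw [hdma, hma]
          have hne : m / a ≠ a := fun h => hda (hdma.trans h)
          rw [if_pos ⟨by omega, by omega⟩, if_neg hda, if_pos hne, if_pos hdma,
            if_neg (by omega : ¬ (a + 1 ≤ d ∧ a + 1 ≤ m / d))]
          rw [hdma]
          ring
        · have hmdne : m / d ≠ a := fun h =>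
            hdma (hmd.symm.trans (congrArg (fun x => m / x) h))
          have t1 : (if d = a then (a : ℤ) else 0) = 0 := by rw [if_neg hda]
          have t2 : (if m / a ≠ a then (if d = m / a then ((m / a : ℕ) : ℤ) else 0) else 0) = 0 := by
            by_cases h : m / a = a
            · rw [if_neg (by simp [h])]
            · rw [if_pos h, if_neg hdma]
          rw [t1, t2]
          have hiff : (a ≤ d ∧ a ≤ m / d) ↔ (a + 1 ≤ d ∧ a + 1 ≤ m / d) := by
            constructor
            · rintro ⟨h1, h2⟩
              omega
            · rintro ⟨h1, h2⟩
              omega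
          by_cases hc : a + 1 ≤ d ∧ a + 1 ≤ m / d
          · rw [if_pos (hiff.2 hc), if_pos hc]; ring
          · rw [if_neg (fun h => hc (hiff.1 h)), if_neg hc]; ring
    rw [Finset.sum_congr rfl key, Finset.sum_add_distrib, Finset.sum_add_distrib,
      Finset.sum_ite_eq' m.divisors a (fun _ => (a : ℤ)),
      if_pos (Nat.mem_divisors.2 ⟨hdvd, hm0⟩)]
    by_cases hne : m / a = a
    · rw [if_neg (by simp [hne])]
      simp only [hne, ne_eq, not_true_eq_false, if_false]
      rw [Finset.sum_const_zero]
    · rw [if_pos hne]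
      have : ∑ d ∈ m.divisors, (if m / a ≠ a then (if d = m / a then ((m / a : ℕ) : ℤ) else 0) else 0)
          = ((m / a : ℕ) : ℤ) := by
        have heach : ∀ d ∈ m.divisors, (if m / a ≠ a then (if d = m / a then ((m / a : ℕ) : ℤ) else 0) else 0)
            = (if d = m / a then ((m / a : ℕ) : ℤ) else 0) := by
          intro d _; rw [if_pos hne]
        rw [Finset.sum_congr rfl heach,
          Finset.sum_ite_eq' m.divisors (m / a) (fun _ => ((m / a : ℕ) : ℤ)),
          if_pos (Nat.mem_divisors.2 ⟨Nat.div_dvd_of_dvd hdvd, hm0⟩)]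
      rw [this]
  · rw [if_neg hdvd, zero_add]
    unfold sigmaTail
    congr 1
    apply Finset.filter_congr
    intro d hd
    simp only [Nat.mem_divisors] at hd
    constructor
    · rintro ⟨h1, h2⟩
      have hd1 : d ≠ a := fun h => hdvd (h ▸ hd.1)
      have hd2 : m / d ≠ a := by
        intro h
        exact hdvd (h ▸ Nat.div_dvd_of_dvd hd.1)
      constructor <;> omega
    · rintro ⟨h1, h2⟩
      constructor <;> omega

theorem sigmaLoop_eq (m : ℕ) (hm : 2 ≤ m) :
    ∀ (K : ℕ) (i sigma : Int), 1 ≤ i → (((m : ℤ) + 1 - i).toNat = K) →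
      FactDiffSigmaLoop (m : ℤ) i sigma = sigma + sigmaTail m i.toNat := by
  intro K
  induction K with
  | zero =>
    intro i sigma hi hK
    have hgt : (m : ℤ) < i := by omega
    have hii : i ≤ i * i := by nlinarith
    rw [FactDiffSigmaLoop, dif_neg (by omega : ¬ i * i ≤ (m : ℤ))]
    have hmi : m < i.toNat * i.toNat := by
      have h1 : m < i.toNat := by omega
      have h2 : i.toNat ≤ i.toNat * i.toNat := Nat.le_mul_of_pos_right _ (by omega)
      omega
    rw [sigmaTail_zero m i.toNat hmi]
    ring
  | succ K ih =>
    intro i sigma hi hK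
    rw [FactDiffSigmaLoop]
    by_cases hcond : i * i ≤ (m : ℤ)
    · rw [dif_pos hcond]
      have hile : i ≤ (m : ℤ) := by nlinarith
      rw [ih (i + 1) _ (by omega) (by omega)]
      set a := i.toNat with hadef
      have hia : i = (a : ℤ) := by omega
      have h1a : 1 ≤ a := by omega
      have haa : a * a ≤ m := by
        have h : ((a : ℤ)) * (a : ℤ) ≤ (m : ℤ) := by rw [← hia]; exact hcond
        exact_mod_cast h
      have hstep := sigmaTail_step m a hm h1a haa
      have hi1 : (i + 1).toNat = a + 1 := by omega
      rw [hi1, hstep]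
      by_cases hdvd : a ∣ m
      · have hmodz : PySem.Int.mod (m : ℤ) i = 0 := by
          rw [PySem.Int.mod_eq_zero_iff_dvd, hia]
          exact Int.natCast_dvd_natCast.2 hdvd
        rw [if_pos (by simp [hmodz])]
        simp only [hia, ne_eq, PySem.Int.floordiv_natCast, Nat.cast_inj, if_pos hdvd]
        by_cases hne : m / a = a
        · rw [if_neg (by simp [hne]), if_neg (by simp [hne])]
          ring
        · rw [if_pos hne, if_pos hne]
          ring
      · have hmodnz : ¬ (PySem.Int.mod (m : ℤ) i = 0) := by
          rw [PySem.Int.mod_eq_zero_iff_dvd, hia]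
          exact fun h => hdvd (Int.natCast_dvd_natCast.1 h)
        simp only [if_neg hdvd]
        rw [if_neg (by simpa using hmodnz)]
        ring
    · rw [dif_neg hcond]
      have hmi : m < i.toNat * i.toNat := by
        have h : (m : ℤ) < i * i := by omega
        have hia : i = ((i.toNat : ℕ) : ℤ) := by omega
        rw [hia] at h
        exact_mod_cast h
      rw [sigmaTail_zero m i.toNat hmi]
      ring

theorem sigmaTail_one (m : ℕ) (hm : 2 ≤ m) :
    sigmaTail m 1 = ∑ d ∈ m.divisors, (d : ℤ) := by
  unfold sigmaTail
  rw [Finset.filter_true_of_mem]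
  intro d hd
  simp only [Nat.mem_divisors] at hd
  have hd1 : 1 ≤ d := Nat.pos_of_dvd_of_pos hd.1 (by omega)
  have : 1 ≤ m / d := Nat.div_pos (Nat.le_of_dvd (by omega) hd.1) (by omega)
  omega

theorem range_div_sum (m : ℕ) (_hm : 2 ≤ m) :
    ∑ k ∈ Finset.range (m - 1),
        (if ((m : ℤ)) % (1 + (k : ℤ)) = 0 then 1 + (k : ℤ) else 0)
      = ∑ d ∈ m.properDivisors, (d : ℤ) := by
  have h1 : ∑ i ∈ Finset.Ico 1 m, (if (m : ℤ) % (i : ℤ) = 0 then (i : ℤ) else 0)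
      = ∑ k ∈ Finset.range (m - 1), (if ((m : ℤ)) % (1 + (k : ℤ)) = 0 then 1 + (k : ℤ) else 0) := by
    rw [Finset.sum_Ico_eq_sum_range]
    apply Finset.sum_congr rfl
    intro k _
    norm_cast
  rw [← h1]
  have h2 : ∀ i ∈ Finset.Ico 1 m, (if (m : ℤ) % (i : ℤ) = 0 then (i : ℤ) else 0)
      = (if i ∣ m then (i : ℤ) else 0) := by
    intro i _
    by_cases h : i ∣ m
    · rw [if_pos ((PySem.Int.emod_eq_zero_iff_dvd _ _).2 (Int.natCast_dvd_natCast.2 h)), if_pos h]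
    · rw [if_neg (fun hc => h (Int.natCast_dvd_natCast.1 ((PySem.Int.emod_eq_zero_iff_dvd _ _).1 hc))),
        if_neg h]
  rw [Finset.sum_congr rfl h2, ← Finset.sum_filter]
  congr 1

theorem gauss_sum (M : ℕ) : 2 * ∑ k ∈ Finset.range M, (1 + (k : ℤ)) = ((M : ℤ) + 1) * M := by
  induction M with
  | zero => simp
  | succ M ih => rw [Finset.sum_range_succ]; push_cast; push_cast at ih; ring_nf; ring_nf at ih; omega

-- ===== VERDICT (by name: the statement is the Claim_ definition above) =====
theorem FactDiff_spec : Claim_equal_FactDiff := by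
  intro n _
  unfold Spec_FactDiff FactDiff FactDiff_alt
  by_cases hn : n ≤ 1
  · rw [PySem.List.pyRange_one_eq_nil hn]
    simp [hn]
  · have hm2 : 2 ≤ n.toNat := by omega
    set m := n.toNat with hmdef
    have hnm : n = (m : ℤ) := by omega
    simp only [if_neg (by omega : ¬ n ≤ 1)]
    -- A side
    rw [PySem.List.pyRange_one, factdiff_fold, List.map_map, List.map_map]
    have hMrw : (n - 1).toNat = m - 1 := by omega
    rw [hMrw]
    have listsum : ∀ (f : ℕ → ℤ), ((List.range (m-1)).map f).sum = ∑ k ∈ Finset.range (m-1), f k := by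
      intro f; rfl
    rw [listsum, listsum]
    -- rewrite mod into %
    have hcongr1 : ∑ k ∈ Finset.range (m-1), ((fun i => if PySem.Int.mod n i == 0 then i else 0) ∘ (fun k : ℕ => 1 + (k:ℤ))) k
        = ∑ k ∈ Finset.range (m-1), (if (n) % (1 + (k : ℤ)) = 0 then 1 + (k : ℤ) else 0) := by
      apply Finset.sum_congr rfl
      intro k _
      simp [PySem.Int.mod_eq_emod_of_pos (by omega : (0:ℤ) < 1 + (k:ℤ))]
    have hcongr2 : ∑ k ∈ Finset.range (m-1), ((fun i => if PySem.Int.mod n i == 0 then 0 else i) ∘ (fun k : ℕ => 1 + (k:ℤ))) k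
        = ∑ k ∈ Finset.range (m-1), (if (n) % (1 + (k : ℤ)) = 0 then 0 else 1 + (k : ℤ)) := by
      apply Finset.sum_congr rfl
      intro k _
      simp [PySem.Int.mod_eq_emod_of_pos (by omega : (0:ℤ) < 1 + (k:ℤ))]
    rw [hcongr1, hcongr2]
    set S1 := ∑ k ∈ Finset.range (m-1), (if (n) % (1 + (k : ℤ)) = 0 then 1 + (k : ℤ) else 0) with hS1
    set S2 := ∑ k ∈ Finset.range (m-1), (if (n) % (1 + (k : ℤ)) = 0 then 0 else 1 + (k : ℤ)) with hS2
    have hsplit : S1 + S2 = ∑ k ∈ Finset.range (m-1), (1 + (k : ℤ)) := by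
      rw [hS1, hS2, ← Finset.sum_add_distrib]
      apply Finset.sum_congr rfl
      intro k _
      split_ifs <;> ring
    have hT := gauss_sum (m - 1)
    have hMcast : ((m - 1 : ℕ) : ℤ) = n - 1 := by omega
    rw [hMcast] at hT
    -- S1 is the proper-divisor sum
    have hP : S1 = ∑ d ∈ m.properDivisors, (d : ℤ) := by
      rw [hS1, hnm]; exact range_div_sum m hm2
    -- B side
    have hsig : FactDiffSigmaLoop n 1 0 = ∑ d ∈ m.divisors, (d : ℤ) := by
      rw [hnm, sigmaLoop_eq m hm2 (((m:ℤ) + 1 - 1).toNat) 1 0 (by omega) rfl]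
      simp [sigmaTail_one m hm2]
    have hdivsum : ∑ d ∈ m.divisors, (d : ℤ) = (∑ d ∈ m.properDivisors, (d : ℤ)) + n := by
      have h := congrArg (fun x : ℕ => (x : ℤ)) (Nat.sum_divisors_eq_sum_properDivisors_add_self (n := m))
      push_cast at h
      rw [hnm]
      exact h
    have hT2 : 2 * (S1 + S2) = n * (n - 1) := by rw [hsplit, hT]; ring
    have hfd : PySem.Int.floordiv (n * (n - 1)) 2 = S1 + S2 := by
      apply (PySem.Int.floordiv_eq_iff_of_pos (by omega)).2
      constructor <;> linarith
    rw [hsig, hdivsum, hfd]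
    linarith
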